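-- pv_equiv track=rewrite | github.com/ZaneLogi/StockUtility | batch_get_stock_history.py | merge_prices
-- ===== SOURCE A (Python) =====
-- def merge_prices(old_list, new_list):
--     # convert old_list to the dict type with the date as the key
--     dict_list = dict((old_list[i]['date'], old_list[i])for i in range(0, len(old_list)))
--     # add new_list to the dict object just created using the date as the key
--     for e in new_list:
--         dict_list[e['date']] = e
--     price_list = []
--     # do sorting on the keys of dict_list
--     keys = [*dict_list]
--     list.sort(keys)
--     # add the data to price_list based on the order of the keys
--     for k in keys:
--         price_list.append(dict_list[k])
--     return price_list
-- ===== SOURCE B (Python) =====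
-- def merge_prices(old_list, new_list):
--     # sort the concatenation stably by date, then keep the last entry of each
--     # run of equal dates (stability makes "last" = newest/override entry)
--     ordered = sorted(old_list + new_list, key=lambda e: e['date'])
--     result = []
--     for cur, nxt in zip(ordered, ordered[1:]):
--         if nxt['date'] != cur['date']:
--             result.append(cur)
--     if ordered:
--         result.append(ordered[-1])
--     return result
-- ===== Notes on version B (the rewrite author's own statement) =====
-- stated objective: alternative
-- what changed: Replaces the dict-based dedup (build a date-keyed dict from old then new, sort its keys, look each key up) by sort-then-scan: stably sort the concatenation by date and keep only the last element of each run of equal dates.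
import Mathlib
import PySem

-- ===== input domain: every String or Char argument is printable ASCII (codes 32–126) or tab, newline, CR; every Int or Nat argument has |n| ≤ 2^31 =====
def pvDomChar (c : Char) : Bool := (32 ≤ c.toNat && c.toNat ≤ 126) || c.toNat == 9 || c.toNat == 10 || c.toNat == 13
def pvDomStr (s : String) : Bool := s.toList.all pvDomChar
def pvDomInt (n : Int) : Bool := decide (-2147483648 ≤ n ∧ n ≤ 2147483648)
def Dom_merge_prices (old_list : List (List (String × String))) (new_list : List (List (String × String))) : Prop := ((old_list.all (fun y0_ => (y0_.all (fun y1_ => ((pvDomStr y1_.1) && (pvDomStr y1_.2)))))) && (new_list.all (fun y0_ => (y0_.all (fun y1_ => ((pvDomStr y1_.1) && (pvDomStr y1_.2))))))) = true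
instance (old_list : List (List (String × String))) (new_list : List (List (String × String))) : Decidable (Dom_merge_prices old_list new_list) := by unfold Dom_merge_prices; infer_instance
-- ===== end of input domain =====

-- B replaces A's dict-based dedup by sort-then-scan (stable sort on date, keep the
-- last element of each equal-date run); same return value, no speed claim.

-- e['date'] (both Pythons do this lookup); Pre_ guarantees the key is present,
-- so the .getD "" default is never reached on admitted inputs.
def pvDate (e : List (String × String)) : String :=
  ((PySem.Dict.mk e).get? "date").getD ""

-- ===== PORT A =====
def merge_prices (old_list : List (List (String × String))) (new_list : List (List (String × String))) : List (List (String × String)) :=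
  -- dict_list = dict((old_list[i]['date'], old_list[i]) for i in range(0, len(old_list)))
  let dict_list := PySem.Dict.ofList (old_list.map (fun e => (pvDate e, e)))
  -- for e in new_list: dict_list[e['date']] = e
  let dict_list := new_list.foldl (fun d e => d.insert (pvDate e) e) dict_list
  -- keys = [*dict_list]; list.sort(keys)
  let keys := PySem.List.sorted dict_list.keys (fun x => x) false
  -- for k in keys: price_list.append(dict_list[k])   (k is always present; getD [] is never reached)
  keys.foldl (fun acc kk => acc ++ [dict_list.getD kk []]) []

-- ===== PORT B =====
-- the scan of Source B: cur is appended when the next date differs, the final element always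
def pvKeepLast : List (List (String × String)) → List (List (String × String))
  | [] => []
  | [cur] => [cur]
  | cur :: nxt :: rest =>
      if pvDate nxt ≠ pvDate cur then cur :: pvKeepLast (nxt :: rest)
      else pvKeepLast (nxt :: rest)

def merge_prices_alt (old_list : List (List (String × String))) (new_list : List (List (String × String))) : List (List (String × String)) :=
  -- ordered = sorted(old_list + new_list, key=lambda e: e['date'])
  pvKeepLast (PySem.List.sorted (old_list ++ new_list) pvDate false)

-- ===== PRECONDITION & SPEC =====
-- Pre_ excludes exactly the inputs where some element has no 'date' key: there the
-- Python A (and B) raises KeyError.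
def Pre_merge_prices (old_list : List (List (String × String))) (new_list : List (List (String × String))) : Prop :=
  ((old_list ++ new_list).all (fun e => e.any (fun p => p.1 == "date"))) = true
instance (old_list : List (List (String × String))) (new_list : List (List (String × String))) : Decidable (Pre_merge_prices old_list new_list) := by unfold Pre_merge_prices; infer_instance

def pvWitness_merge_prices : (List (List (String × String))) × (List (List (String × String))) :=
  ([[("date", "2024-01-02"), ("close", "10")]], [[("date", "2024-01-01"), ("close", "9")], [("date", "2024-01-02"), ("close", "11")]])

def Spec_merge_prices (old_list : List (List (String × String))) (new_list : List (List (String × String))) (out : List (List (String × String))) : Prop := out = merge_prices_alt old_list new_list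
instance (old_list : List (List (String × String))) (new_list : List (List (String × String))) (out : List (List (String × String))) : Decidable (Spec_merge_prices old_list new_list out) := by unfold Spec_merge_prices; infer_instance

-- ===== CLAIM (what is proved, stated in full; the proofs are below) =====
def Claim_equal_merge_prices : Prop := ∀ (old_list : List (List (String × String))) (new_list : List (List (String × String))), Dom_merge_prices old_list new_list → Pre_merge_prices old_list new_list → Spec_merge_prices old_list new_list (merge_prices old_list new_list)

-- ===== LEMMAS AND PROOFS =====

-- the value A's dict finally holds at key kk: the LAST element of cs with that date
def pvLastAt (cs : List (List (String × String))) (kk : String) : List (String × String) :=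
  ((cs.filter (fun e => pvDate e == kk)).getLast?).getD []

lemma pv_getD_foldl_insert (cs : List (List (String × String))) (d : PySem.Dict String (List (String × String))) (kk : String) :
    (cs.foldl (fun d e => d.insert (pvDate e) e) d).getD kk [] =
      ((cs.filter (fun e => pvDate e == kk)).getLast?).getD (d.getD kk []) := by
  induction cs generalizing d with
  | nil => simp
  | cons e cs ih =>
      simp only [List.foldl_cons, List.filter_cons, ih, PySem.Dict.getD_insert]
      by_cases h : pvDate e = kk
      · simp [h, List.getLast?_cons]
      · simp [h, Ne.symm h]

-- insertBy into a key-sorted list appends x at the END of its equal-key run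
lemma pv_filter_insertBy (kk : String) (x : List (String × String)) (acc : List (List (String × String)))
    (h : acc.Pairwise (fun a b => pvDate a ≤ pvDate b)) :
    (PySem.List.insertBy (fun a b => decide (pvDate a < pvDate b)) x acc).filter (fun e => pvDate e == kk) =
      if pvDate x == kk then acc.filter (fun e => pvDate e == kk) ++ [x]
      else acc.filter (fun e => pvDate e == kk) := by
  induction acc with
  | nil => simp [PySem.List.insertBy]; split_ifs <;> simp_all
  | cons y ys ih =>
      rw [List.pairwise_cons] at h
      obtain ⟨hy, hp⟩ := h
      rw [PySem.List.insertBy]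
      by_cases hlt : pvDate x < pvDate y
      · simp only [hlt, decide_true, if_true]
        by_cases hx : pvDate x = kk
        · have hnilf : (y :: ys).filter (fun e => pvDate e == kk) = [] := by
            rw [List.filter_eq_nil_iff]
            intro z hz
            have hyz : pvDate y ≤ pvDate z := by
              rcases List.mem_cons.mp hz with rfl | hz'
              · exact le_refl _
              · exact hy z hz'
            have hlt2 : pvDate x < pvDate z := lt_of_lt_of_le hlt hyz
            simp only [beq_iff_eq]
            intro hzk
            rw [hx, hzk] at hlt2
            exact lt_irrefl _ hlt2
          simp [hx, hnilf]
        · simp [List.filter_cons, hx]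
      · rw [if_neg (by simpa using hlt), List.filter_cons, ih hp, List.filter_cons]
        by_cases hyk : pvDate y = kk <;> by_cases hxk : pvDate x = kk <;>
          simp [hyk, hxk]

lemma pv_foldl_insertBy_filter (kk : String) (cs : List (List (String × String)))
    (acc : List (List (String × String))) (h : acc.Pairwise (fun a b => pvDate a ≤ pvDate b)) :
    (cs.foldl (fun a x => PySem.List.insertBy (fun a b => decide (pvDate a < pvDate b)) x a) acc).filter (fun e => pvDate e == kk) =
      acc.filter (fun e => pvDate e == kk) ++ cs.filter (fun e => pvDate e == kk) := by
  induction cs generalizing acc with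
  | nil => simp
  | cons x cs ih =>
      simp only [List.foldl_cons, List.filter_cons]
      rw [ih _ (PySem.List.insertBy_pairwise_le pvDate x acc h), pv_filter_insertBy kk x acc h]
      by_cases hx : pvDate x = kk <;> simp [hx]

-- STABILITY of the sort: each date's entries keep their relative order
lemma pv_sorted_filter (cs : List (List (String × String))) (kk : String) :
    (PySem.List.sorted cs pvDate false).filter (fun e => pvDate e == kk) =
      cs.filter (fun e => pvDate e == kk) := by
  rw [PySem.List.sorted_eq_foldl_insertBy, pv_foldl_insertBy_filter kk cs [] (by simp)]
  simp

lemma pv_foldl_add_sublist {α : Type} [BEq α] [LawfulBEq α] (xs s ys : List α) (h : s.Sublist ys) :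
    (xs.foldl PySem.Set.add s).Sublist (ys ++ xs) := by
  induction xs generalizing s ys with
  | nil => simpa using h
  | cons x xs ih =>
      have hadd : (PySem.Set.add s x).Sublist (ys ++ [x]) := by
        rw [PySem.Set.add_eq_ite]
        split_ifs
        · exact h.trans (List.sublist_append_left ys [x])
        · exact h.append (List.Sublist.refl [x])
      simpa using ih (PySem.Set.add s x) (ys ++ [x]) hadd

lemma pv_ofList_sublist {α : Type} [BEq α] [LawfulBEq α] (xs : List α) : (PySem.Set.ofList xs).Sublist xs := by
  rw [PySem.Set.ofList_eq_foldl]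
  simpa using pv_foldl_add_sublist xs [] [] (List.Sublist.refl [])

lemma pv_pairwise_lt_ofList (ks : List String) (h : ks.Pairwise (· ≤ ·)) :
    (PySem.Set.ofList ks).Pairwise (· < ·) := by
  have h1 : (PySem.Set.ofList ks).Pairwise (· ≤ ·) := h.sublist (pv_ofList_sublist ks)
  have h2 : (PySem.Set.ofList ks).Pairwise (· ≠ ·) := PySem.Set.nodup_ofList ks
  exact (h1.and h2).imp (fun hab => lt_of_le_of_ne hab.1 hab.2)

-- core of B: keepLast of a key-sorted list = one entry per distinct key, the last of its run
lemma pv_keepLast_eq (l : List (List (String × String)))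
    (h : l.Pairwise (fun a b => pvDate a ≤ pvDate b)) :
    pvKeepLast l = (PySem.Set.ofList (l.map pvDate)).map (pvLastAt l) := by
  induction l using pvKeepLast.induct with
  | case1 => simp [pvKeepLast]
  | case2 cur => simp [pvKeepLast, pvLastAt, PySem.Set.ofList]
  | case3 cur nxt rest hne ih =>
      rw [List.pairwise_cons] at h
      obtain ⟨hcur, htail⟩ := h
      have hlt : pvDate cur < pvDate nxt :=
        lt_of_le_of_ne (hcur nxt (List.mem_cons_self)) (Ne.symm hne)
      have hnotmem : pvDate cur ∉ (nxt :: rest).map pvDate := by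
        intro hmem
        obtain ⟨z, hz, hzk⟩ := List.mem_map.mp hmem
        have : pvDate cur < pvDate z := lt_of_lt_of_le hlt (by
          rcases List.mem_cons.mp hz with rfl | hz' <;>
            [exact le_refl _; exact (List.pairwise_cons.mp htail).1 z hz'])
        rw [hzk] at this; exact absurd rfl (ne_of_gt this)
      rw [pvKeepLast, if_pos hne, List.map_cons, PySem.Set.ofList_cons]
      have hdisc : (PySem.Set.ofList ((nxt :: rest).map pvDate)).discard (pvDate cur) =
          PySem.Set.ofList ((nxt :: rest).map pvDate) := by
        unfold PySem.Set.discard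
        apply List.filter_eq_self.mpr
        intro a ha
        have : a ∈ (nxt :: rest).map pvDate := (PySem.Set.mem_ofList _ _).mp ha
        simp only [Bool.not_eq_true', beq_eq_false_iff_ne, ne_eq]
        intro he; exact hnotmem (he ▸ this)
      rw [hdisc, List.map_cons, ih htail]
      congr 1
      · -- head: pvLastAt over the whole list at key (pvDate cur) is cur itself
        have hnil : (nxt :: rest).filter (fun e => pvDate e == pvDate cur) = [] := by
          rw [List.filter_eq_nil_iff]
          intro z hz
          simp only [beq_iff_eq]
          intro hzk
          exact hnotmem (List.mem_map.mpr ⟨z, hz, hzk⟩)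
        simp [pvLastAt, hnil]
      · -- tail: keys there differ from pvDate cur, so filtering ignores cur
        apply List.map_congr_left
        intro kk hkk
        have hkkmem : kk ∈ (nxt :: rest).map pvDate := (PySem.Set.mem_ofList _ _).mp hkk
        have hkkne : pvDate cur ≠ kk := fun he => hnotmem (he ▸ hkkmem)
        simp [pvLastAt, List.filter_cons, hkkne]
  | case4 cur nxt rest hne ih =>
      rw [List.pairwise_cons] at h
      obtain ⟨hcur, htail⟩ := h
      have heq : pvDate nxt = pvDate cur := not_not.mp hne
      rw [pvKeepLast, if_neg hne, ih htail]
      have hset : PySem.Set.ofList ((cur :: nxt :: rest).map pvDate) =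
          PySem.Set.ofList ((nxt :: rest).map pvDate) := by
        simp only [List.map_cons]
        rw [PySem.Set.ofList_eq_foldl, PySem.Set.ofList_eq_foldl]
        simp only [List.foldl_cons]
        congr 1
        rw [heq]
        exact PySem.Set.add_of_mem (by simp)
      rw [hset]
      apply List.map_congr_left
      intro kk hkk
      have hkkmem : kk ∈ (nxt :: rest).map pvDate := (PySem.Set.mem_ofList _ _).mp hkk
      by_cases hck : pvDate cur = kk
      · -- the run continues with nxt, so the filtered tail is nonempty and cur is dropped
        have hb : (pvDate nxt == kk) = true := by simp [heq, hck]
        simp only [pvLastAt, List.filter_cons, hck, beq_self_eq_true, if_true, hb]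
        rw [List.getLast?_cons_cons]
      · simp [pvLastAt, List.filter_cons, hck]

-- both programs unconditionally compute the same list (with e['date'] read as pvDate)
lemma pv_merge_eq (old_list new_list : List (List (String × String))) :
    merge_prices old_list new_list = merge_prices_alt old_list new_list := by
  simp only [merge_prices, merge_prices_alt]
  set cs := old_list ++ new_list with hcs
  -- A's dict is one fold of inserts over cs
  have hfold : (new_list.foldl (fun d e => d.insert (pvDate e) e)
      (PySem.Dict.ofList (old_list.map (fun e => (pvDate e, e))))) =
      cs.foldl (fun d e => d.insert (pvDate e) e) PySem.Dict.empty := by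
    rw [hcs, List.foldl_append]
    congr 1
    unfold PySem.Dict.ofList PySem.Dict.update
    rw [List.foldl_map]
  rw [hfold]
  -- A's keys are the distinct dates of cs
  have hkeys : (cs.foldl (fun d e => d.insert (pvDate e) e) PySem.Dict.empty).keys =
      PySem.Set.ofList (cs.map pvDate) := by
    rw [PySem.Dict.keys_foldl_insert_key cs pvDate (fun _ e => e) PySem.Dict.empty]
    rw [PySem.Dict.keys_empty, PySem.Set.update_nil_left]
  rw [hkeys]
  -- A's output is a map over its sorted keys
  rw [PySem.List.foldl_append_singleton_eq_map (fun kk =>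
    (cs.foldl (fun d e => d.insert (pvDate e) e) PySem.Dict.empty).getD kk []), List.nil_append]
  -- the sorted keys equal the distinct dates of the sorted list
  have hpair : (PySem.Set.ofList ((PySem.List.sorted cs pvDate false).map pvDate)).Pairwise (· < ·) :=
    pv_pairwise_lt_ofList _ (PySem.List.sorted_map_key_pairwise cs pvDate)
  have hperm : (PySem.Set.ofList ((PySem.List.sorted cs pvDate false).map pvDate)).Perm
      (PySem.Set.ofList (cs.map pvDate)) := by
    rw [List.perm_ext_iff_of_nodup (PySem.Set.nodup_ofList _) (PySem.Set.nodup_ofList _)]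
    intro a
    simp only [PySem.Set.mem_ofList, List.mem_map]
    constructor
    · rintro ⟨z, hz, rfl⟩; exact ⟨z, (PySem.List.mem_sorted cs pvDate false z).mp hz, rfl⟩
    · rintro ⟨z, hz, rfl⟩; exact ⟨z, (PySem.List.mem_sorted cs pvDate false z).mpr hz, rfl⟩
  have hsortedkeys : PySem.List.sorted (PySem.Set.ofList (cs.map pvDate)) (fun x => x) false =
      PySem.Set.ofList ((PySem.List.sorted cs pvDate false).map pvDate) :=
    PySem.List.sorted_eq_of_perm_of_pairwise_lt _ _ (fun x => x) hperm hpair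
  rw [hsortedkeys]
  -- B's scan, on the sorted list
  rw [pv_keepLast_eq _ (PySem.List.sorted_pairwise cs pvDate)]
  apply List.map_congr_left
  intro kk _
  rw [pv_getD_foldl_insert cs PySem.Dict.empty kk, PySem.Dict.getD_empty]
  unfold pvLastAt
  rw [pv_sorted_filter cs kk]

-- ===== VERDICT (by name: the statement is the Claim_ definition above) =====
theorem merge_prices_spec : Claim_equal_merge_prices := by
  intro old_list new_list _ _
  unfold Spec_merge_prices
  exact pv_merge_eq old_list new_list
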